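-- pv_equiv track=rewrite | github.com/manuellpsk/leetcode-problems | problems/680/main.py | cadena_rara
-- ===== SOURCE A (Python) =====
-- def cadena_rara(s):
--     i = 0
--     j = len(s) - 1
--     while i <= j:
--         if s[i] == s[j]:
--             i += 1
--             j -= 1
--         else:
--             return s[i:j+1]
-- ===== SOURCE B (Python) =====
-- def cadena_rara(s):
--     while len(s) > 1 and s[0] == s[-1]:
--         s = s[1:-1]
--     return s if len(s) > 1 else None
-- ===== Notes on version B (the rewrite author's own statement) =====
-- stated objective: alternative
-- what changed: Replaces the two-pointer index loop over a fixed string with a loop that repeatedly slices off the matching end characters, returning the shrunken string itself at the first mismatch (no index arithmetic).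
import Mathlib
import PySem

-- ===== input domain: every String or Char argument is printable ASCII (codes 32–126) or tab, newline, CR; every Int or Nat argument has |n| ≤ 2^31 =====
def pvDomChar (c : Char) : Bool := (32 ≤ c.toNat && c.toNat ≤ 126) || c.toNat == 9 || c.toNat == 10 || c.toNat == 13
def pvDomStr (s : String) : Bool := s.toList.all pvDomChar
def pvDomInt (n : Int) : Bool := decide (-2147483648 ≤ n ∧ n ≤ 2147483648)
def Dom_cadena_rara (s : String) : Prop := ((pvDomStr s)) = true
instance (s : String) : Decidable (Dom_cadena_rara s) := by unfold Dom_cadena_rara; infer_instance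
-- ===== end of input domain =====

-- B re-implements A's two-pointer index scan as a loop that peels matched end characters off the string itself; same return value, different decomposition (not faster).

-- ===== PORT A =====
-- the while loop of A, state (i, j); s[i] / s[j] are always in range while i ≤ j
def cadenaRaraLoopA (l : List Char) (i j : Int) : Option (List Char) :=
  if _h : i ≤ j then
    if PySem.List.pyGetD l i ' ' == PySem.List.pyGetD l j ' ' then
      cadenaRaraLoopA l (i + 1) (j - 1)
    else
      some (PySem.List.slice l (some i) (some (j + 1)))
  else none
termination_by (j + 1 - i).toNat
decreasing_by omega

def cadena_rara (s : String) : Option String :=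
  (cadenaRaraLoopA s.toList 0 (PySem.Str.len s - 1)).map String.ofList

-- ===== PORT B =====
-- Source B: while len(s) > 1 and s[0] == s[-1]: s = s[1:-1]; then s if len(s) > 1 else None
def cadenaRaraRecB (l : List Char) : Option (List Char) :=
  if _h : 1 < l.length ∧ PySem.List.pyGetD l 0 ' ' = PySem.List.pyGetD l (-1) ' ' then
    cadenaRaraRecB l.tail.dropLast   -- s = s[1:-1]
  else if 1 < l.length then some l else none
termination_by l.length
decreasing_by simp_all [List.length_dropLast, List.length_tail]; omega

def cadena_rara_alt (s : String) : Option String :=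
  (cadenaRaraRecB s.toList).map String.ofList

-- ===== PRECONDITION & SPEC =====
def Spec_cadena_rara (s : String) (out : Option String) : Prop := out = cadena_rara_alt s
instance (s : String) (out : Option String) : Decidable (Spec_cadena_rara s out) := by unfold Spec_cadena_rara; infer_instance

-- ===== CLAIM (what is proved, stated in full; the proofs are below) =====
def Claim_equal_cadena_rara : Prop := ∀ (s : String), Dom_cadena_rara s → Spec_cadena_rara s (cadena_rara s)

-- ===== LEMMAS AND PROOFS =====

theorem recB_nil : cadenaRaraRecB [] = none := by rw [cadenaRaraRecB]; simp

theorem cadenaRara_key (l : List Char) :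
    ∀ (n : Nat) (i j : Int), (j + 1 - i).toNat = n → 0 ≤ i → j < l.length →
      cadenaRaraLoopA l i j = cadenaRaraRecB ((l.drop i.toNat).take (j + 1 - i).toNat) := by
  intro n
  induction n using Nat.strong_induction_on with
  | _ n ih =>
    intro i j hn hi hj
    rw [cadenaRaraLoopA]
    by_cases hij : i ≤ j
    · -- i ≤ j : both indices in range
      have hkpos : 0 < (j + 1 - i).toNat := by omega
      set k : Nat := (j + 1 - i).toNat with hk
      set a : Nat := i.toNat with ha
      have hjl : j.toNat < l.length := by omega
      have hal : a < l.length := by omega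
      have hjk : a + k = j.toNat + 1 := by omega
      set sub : List Char := (l.drop a).take k with hsub
      have hsl : sub.length = k := by
        simp only [hsub, List.length_take, List.length_drop]; omega
      have hsub0 : ∀ (m : Nat) (hm : m < k), sub[m]'(by omega) = l[a + m]'(by omega) := by
        intro m hm
        simp [hsub]
      have h0 : PySem.List.pyGetD sub 0 ' ' = l[a] := by
        rw [PySem.List.pyGetD_eq_getElem sub ' ' (by omega) (by rw [hsl]; exact_mod_cast hkpos)]
        simpa using hsub0 0 hkpos
      have hlast : PySem.List.pyGetD sub (-1) ' ' = l[j.toNat] := by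
        rw [PySem.List.pyGetD_neg_one sub ' '
          (by intro h; rw [h] at hsl; simp at hsl; omega)]
        rw [List.getLast_eq_getElem]
        simp only [hsl]
        rw [hsub0 (k - 1) (by omega)]
        congr 1
        omega
      have hgi : PySem.List.pyGetD l i ' ' = l[a] :=
        PySem.List.pyGetD_eq_getElem l ' ' hi (by omega)
      have hgj : PySem.List.pyGetD l j ' ' = l[j.toNat] :=
        PySem.List.pyGetD_eq_getElem l ' ' (by omega) (by omega)
      rw [dif_pos hij, hgi, hgj]
      by_cases heq : l[a] = l[j.toNat]
      · -- matching ends: loop recurses; RecB peels one layer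
        rw [if_pos (by simpa using heq)]
        rw [ih ((j - 1) + 1 - (i + 1)).toNat (by omega) (i + 1) (j - 1) rfl (by omega) (by omega)]
        have harg : (l.drop (i + 1).toNat).take ((j - 1) + 1 - (i + 1)).toNat
            = sub.tail.dropLast := by
          apply List.ext_getElem
          · simp only [List.length_dropLast, List.length_tail, List.length_take,
              List.length_drop, hsl]
            omega
          · intro m h1 h2
            simp only [hsub, List.getElem_dropLast, List.getElem_tail, List.getElem_take,
              List.getElem_drop]
            congr 1
            omega
        rw [harg]
        by_cases hk1 : k = 1
        · -- the peeled string is empty and sub has length 1: both sides are none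
          have hnil : sub.tail.dropLast = [] := by
            have : sub.tail.dropLast.length = 0 := by
              simp only [List.length_dropLast, List.length_tail, hsl, hk1]
            exact List.eq_nil_of_length_eq_zero this
          rw [hnil, recB_nil]
          rw [cadenaRaraRecB]
          rw [dif_neg (by rw [hsl, hk1]; simp), if_neg (by rw [hsl, hk1]; simp)]
        · -- length ≥ 2: RecB takes the equal branch and peels
          conv_rhs => rw [cadenaRaraRecB]
          rw [dif_pos ⟨by omega, by rw [h0, hlast]; simpa using heq⟩]
      · -- mismatch: loop returns the slice, RecB returns sub unchanged
        rw [if_neg (by simpa using heq)]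
        have hslice : PySem.List.slice l (some i) (some (j + 1)) = sub := by
          rw [PySem.List.slice_of_nonneg l hi (by omega) (by omega) (by omega)]
          simp only [hsub, ha, hk]
          congr 1
          omega
        rw [hslice]
        have hk2 : 2 ≤ k := by
          rcases Nat.lt_or_ge k 2 with h | h
          · exfalso
            apply heq
            congr 1
            omega
          · exact h
        conv_rhs => rw [cadenaRaraRecB]
        rw [dif_neg (by rw [h0, hlast]; exact fun h => heq h.2), if_pos (by omega)]
    · -- i > j : loop ends with none; sub is empty
      rw [dif_neg hij]
      have h0 : (j + 1 - i).toNat = 0 := by omega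
      rw [h0]
      simp [recB_nil]

-- ===== VERDICT (by name: the statement is the Claim_ definition above) =====
theorem cadena_rara_spec : Claim_equal_cadena_rara := by
  intro s _
  unfold Spec_cadena_rara cadena_rara cadena_rara_alt
  have h := cadenaRara_key s.toList (((s.toList.length : Int) - 1) + 1 - 0).toNat 0
    ((s.toList.length : Int) - 1) rfl (by omega) (by omega)
  have hlen : PySem.Str.len s = (s.toList.length : Int) := by
    simp [PySem.Str.len_eq]
  rw [hlen, h]
  have harg : (s.toList.drop (0 : Int).toNat).take
      (((s.toList.length : Int) - 1) + 1 - 0).toNat = s.toList := by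
    have h2 : (((s.toList.length : Int) - 1) + 1 - 0).toNat = s.toList.length := by omega
    rw [h2]
    simp
  rw [harg]
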